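-- pv_equiv track=rewrite | github.com/pypi-data/pypi-mirror-333 | packages/spartaCalculation/spartaCalculation-0.0.31.tar.gz/spartaCalculation-0.0.31/calculations/utils/distance.py | find_distance_frame_index
-- ===== SOURCE A (Python) =====
-- from typing import List
--
-- def find_distance_frame_index(
--     distances: List[int], pool_length: int = 50, zone: int = 0
-- ) -> int:
--     """
--     Find the nearest distance for the zone passed
--
--     Parameter
--     ---------
--     distances: <list[number]> list of distances
--     zone: <number> zone number of a segment
--
--     Returns
--     -------
--     <number> the index of the nearest distances
--     <None> if the zone is not defined
--     """
--     if zone is None: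
--         return None
--
--     if int(zone / pool_length) % 2 == 0:
--         corrected_zone = zone % pool_length
--     else:
--         corrected_zone = pool_length - (zone % pool_length)
--
--     nearest_distances = []
--
--     for i in distances:
--         nearest_distances.append(abs(i - corrected_zone))
--
--     return nearest_distances.index(min(nearest_distances))
-- ===== SOURCE B (Python) =====
-- def find_distance_frame_index(distances, pool_length=50, zone=0):
--     if zone is None:
--         return None
--
--     if int(zone / pool_length) % 2 == 0:
--         corrected_zone = zone % pool_length
--     else:
--         corrected_zone = pool_length - (zone % pool_length)
--
--     best_index = None
--     best_diff = None
--     for index, distance in enumerate(distances):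
--         diff = abs(distance - corrected_zone)
--         if best_diff is None or diff < best_diff:
--             best_index, best_diff = index, diff
--     return best_index
-- ===== Notes on version B (the rewrite author's own statement) =====
-- stated objective: simpler
-- what changed: Replaced the built diff list plus min() plus a second .index() scan with a single indexed pass keeping the best index and best diff (strictly-smaller updates, so the first minimum wins); Pre_ excludes empty distances, where A raises ValueError from min(), and pool_length = 0, where both raise ZeroDivisionError.
import Mathlib
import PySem

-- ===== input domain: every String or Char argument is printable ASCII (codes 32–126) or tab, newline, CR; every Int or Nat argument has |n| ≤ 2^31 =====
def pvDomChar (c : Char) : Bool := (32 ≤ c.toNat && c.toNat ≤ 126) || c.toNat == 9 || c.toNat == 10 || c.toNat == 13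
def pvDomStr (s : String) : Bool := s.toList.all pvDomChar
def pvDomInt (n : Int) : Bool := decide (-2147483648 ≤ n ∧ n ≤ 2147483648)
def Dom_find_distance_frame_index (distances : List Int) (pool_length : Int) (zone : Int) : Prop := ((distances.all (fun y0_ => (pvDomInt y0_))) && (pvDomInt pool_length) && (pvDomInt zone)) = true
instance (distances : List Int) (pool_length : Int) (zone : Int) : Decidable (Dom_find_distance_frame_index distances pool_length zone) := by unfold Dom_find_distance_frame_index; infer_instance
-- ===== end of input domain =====

-- B replaces A's build-a-diff-list + min() + .index() (three passes, auxiliary list) by one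
-- indexed pass keeping the best index/diff (strict '<' so the first minimum wins): simpler, O(1) extra space.

-- ===== PORT A =====
-- 'zone is None' cannot fire: zone is an Int here.
-- int(zone / pool_length) is truncating division on the |n| ≤ 2^31 domain (float rounding cannot
-- cross an integer there), ported as Int.tdiv; '%' is Python's floor mod, PySem.Int.mod.
def find_distance_frame_index (distances : List Int) (pool_length : Int) (zone : Int) : Option Int :=
  let corrected_zone : Int :=
    if PySem.Int.mod (Int.tdiv zone pool_length) 2 = 0 then PySem.Int.mod zone pool_length
    else pool_length - PySem.Int.mod zone pool_length
  let nearest_distances := distances.foldl (fun acc i => acc ++ [|i - corrected_zone|]) []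
  -- min() on the empty list raises ValueError (excluded by Pre_): min? = none there
  (PySem.List.min? nearest_distances (fun y => y)).bind
    (fun m => Option.map (fun k : Nat => (k : Int)) (PySem.List.index? nearest_distances m))

-- ===== PORT B =====
-- the for-loop of Source B: best = none / some (best_index, best_diff), updated on strictly smaller diff
def fdfiLoop (cz : Int) : List Int → Int → Option (Int × Int) → Option (Int × Int)
  | [], _, best => best
  | d :: rest, idx, best =>
    let diff := |d - cz|
    match best with
    | none => fdfiLoop cz rest (idx + 1) (some (idx, diff))
    | some (bi, bd) =>
        if diff < bd then fdfiLoop cz rest (idx + 1) (some (idx, diff))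
        else fdfiLoop cz rest (idx + 1) (some (bi, bd))

def find_distance_frame_index_alt (distances : List Int) (pool_length : Int) (zone : Int) : Option Int :=
  let corrected_zone : Int :=
    if PySem.Int.mod (Int.tdiv zone pool_length) 2 = 0 then PySem.Int.mod zone pool_length
    else pool_length - PySem.Int.mod zone pool_length
  (fdfiLoop corrected_zone distances 0 none).map (fun b => b.1)

-- ===== PRECONDITION & SPEC =====
-- Pre_ excludes exactly the inputs where A raises: empty distances (ValueError from min())
-- and pool_length = 0 (ZeroDivisionError).
def Pre_find_distance_frame_index (distances : List Int) (pool_length : Int) (zone : Int) : Prop :=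
  distances ≠ [] ∧ pool_length ≠ 0
instance (distances : List Int) (pool_length : Int) (zone : Int) : Decidable (Pre_find_distance_frame_index distances pool_length zone) := by unfold Pre_find_distance_frame_index; infer_instance

def pvWitness_find_distance_frame_index : List Int × Int × Int := ([25, 60], 50, 30)

def Spec_find_distance_frame_index (distances : List Int) (pool_length : Int) (zone : Int) (out : Option Int) : Prop := out = find_distance_frame_index_alt distances pool_length zone
instance (distances : List Int) (pool_length : Int) (zone : Int) (out : Option Int) : Decidable (Spec_find_distance_frame_index distances pool_length zone out) := by unfold Spec_find_distance_frame_index; infer_instance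

-- ===== CLAIM (what is proved, stated in full; the proofs are below) =====
def Claim_equal_find_distance_frame_index : Prop := ∀ (distances : List Int) (pool_length : Int) (zone : Int), Dom_find_distance_frame_index distances pool_length zone → Pre_find_distance_frame_index distances pool_length zone → Spec_find_distance_frame_index distances pool_length zone (find_distance_frame_index distances pool_length zone)


-- ===== LEMMAS AND PROOFS =====

-- first-argmin of a list: index of the first minimal element together with the minimal value
def fmi : List Int → Option (Nat × Int)
  | [] => none
  | x :: r =>
    match fmi r with
    | none => some (0, x)
    | some (j, m) => if x ≤ m then some (0, x) else some (j + 1, m)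

-- how fdfiLoop's accumulator is updated by the first-argmin of the remaining diffs
def fdfiUpd (k bi bd : Int) : Option (Nat × Int) → Int × Int
  | none => (bi, bd)
  | some (j, m) => if m < bd then (k + (j : Int), m) else (bi, bd)

theorem fmi_cons_some (x : Int) (l : List Int) : ∃ j m, fmi (x :: l) = some (j, m) := by
  cases h : fmi l with
  | none => exact ⟨0, x, by simp [fmi, h]⟩
  | some p =>
    by_cases hx : x ≤ p.2
    · exact ⟨0, x, by simp [fmi, h, hx]⟩
    · exact ⟨p.1 + 1, p.2, by simp [fmi, h, hx]⟩

theorem foldl_min_swap (l : List Int) : ∀ (a b : Int), l.foldl min (min a b) = min a (l.foldl min b) := by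
  induction l with
  | nil => intro a b; rfl
  | cons c l ih =>
    intro a b
    simp only [List.foldl_cons]
    rw [min_assoc, ih]

theorem foldl_append_map (cz : Int) (xs : List Int) : ∀ (acc : List Int),
    xs.foldl (fun a i => a ++ [|i - cz|]) acc = acc ++ xs.map (fun i => |i - cz|) := by
  induction xs with
  | nil => intro acc; simp
  | cons x r ih => intro acc; simp [ih]

theorem fmi_snd (r : List Int) : ∀ (x : Int), (fmi (x :: r)).map Prod.snd = some (r.foldl min x) := by
  induction r with
  | nil => intro x; simp [fmi]
  | cons y r' ih =>
    intro x
    obtain ⟨p, hp, hsnd⟩ := Option.map_eq_some_iff.mp (ih y)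
    obtain ⟨j, m⟩ := p
    simp only at hsnd
    have e : fmi (x :: y :: r') = if x ≤ m then some (0, x) else some (j + 1, m) := by
      conv_lhs => rw [fmi]
      rw [hp]
    rw [e, List.foldl_cons, foldl_min_swap, ← hsnd]
    split_ifs with h <;> simp <;> omega

theorem fmi_index : ∀ (l : List Int) (j : Nat) (m : Int),
    fmi l = some (j, m) → PySem.List.index? l m = some j := by
  intro l
  induction l with
  | nil => intro j m h; simp [fmi] at h
  | cons x r ih =>
    intro j m h
    cases h' : fmi r with
    | none =>
      rw [fmi, h'] at h
      obtain ⟨rfl, rfl⟩ : 0 = j ∧ x = m := by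
        refine ⟨?_, ?_⟩ <;> · injection h with h; injection h with h1 h2
      exact PySem.List.index?_cons_self x r
    | some p =>
      rw [fmi, h'] at h
      by_cases hx : x ≤ p.2
      · simp only [hx, if_true, Option.some.injEq, Prod.mk.injEq] at h
        obtain ⟨rfl, rfl⟩ : 0 = j ∧ x = m := ⟨h.1, h.2⟩
        exact PySem.List.index?_cons_self x r
      · simp only [hx, if_false, Option.some.injEq, Prod.mk.injEq] at h
        obtain ⟨rfl, rfl⟩ : p.1 + 1 = j ∧ p.2 = m := ⟨h.1, h.2⟩
        rw [PySem.List.index?_cons_of_ne r (show x ≠ p.2 by omega)]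
        rw [ih p.1 p.2 (by rw [h'])]
        rfl

theorem A_char (l : List Int) (j : Nat) (m : Int) (h : fmi l = some (j, m)) :
    (PySem.List.min? l (fun y => y)).bind
      (fun mm => Option.map (fun k : Nat => (k : Int)) (PySem.List.index? l mm)) = some (j : Int) := by
  cases l with
  | nil => simp [fmi] at h
  | cons x r =>
    have hsnd := fmi_snd r x
    rw [h] at hsnd
    simp only [Option.map_some, Option.some.injEq] at hsnd
    rw [PySem.List.min?_id_cons, ← hsnd, Option.bind_some, fmi_index _ _ _ h]
    rfl

theorem loop_char (cz : Int) : ∀ (xs : List Int) (k bi bd : Int),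
    fdfiLoop cz xs k (some (bi, bd)) =
      some (fdfiUpd k bi bd (fmi (xs.map (fun d => |d - cz|)))) := by
  intro xs
  induction xs with
  | nil => intro k bi bd; simp [fdfiLoop, fmi, fdfiUpd]
  | cons x r ih =>
    intro k bi bd
    simp only [fdfiLoop, List.map_cons]
    cases h' : fmi (r.map (fun d => |d - cz|)) with
    | none =>
      have hm : fmi (|x - cz| :: r.map (fun d => |d - cz|)) = some (0, |x - cz|) := by
        rw [fmi, h']
      rw [hm]
      split_ifs with h1 <;> rw [ih, h'] <;> simp [fdfiUpd, h1]
    | some p =>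
      obtain ⟨j', m'⟩ := p
      have hm : fmi (|x - cz| :: r.map (fun d => |d - cz|)) =
          if |x - cz| ≤ m' then some (0, |x - cz|) else some (j' + 1, m') := by
        conv_lhs => rw [fmi]
        rw [h']
      rw [hm]
      by_cases h2 : |x - cz| ≤ m' <;> by_cases h1 : |x - cz| < bd <;>
        simp only [h2, h1, if_true, if_false] <;> rw [ih, h'] <;>
        simp only [fdfiUpd, Option.some.injEq] <;>
        split_ifs <;> simp_all [Prod.ext_iff] <;> omega

-- ===== VERDICT (by name: the statement is the Claim_ definition above) =====
theorem find_distance_frame_index_spec : Claim_equal_find_distance_frame_index := by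
  intro distances pool_length zone _ hpre
  unfold Spec_find_distance_frame_index
  obtain ⟨hne, -⟩ := hpre
  cases distances with
  | nil => exact absurd rfl hne
  | cons x r =>
    simp only [find_distance_frame_index, find_distance_frame_index_alt]
    generalize (if PySem.Int.mod (Int.tdiv zone pool_length) 2 = 0 then PySem.Int.mod zone pool_length
      else pool_length - PySem.Int.mod zone pool_length) = cz
    rw [foldl_append_map]
    simp only [List.nil_append, List.map_cons, fdfiLoop]
    obtain ⟨j, m, hf⟩ := fmi_cons_some (|x - cz|) (r.map (fun d => |d - cz|))
    rw [A_char _ _ _ hf]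
    rw [show (0:Int) + 1 = 1 from rfl, loop_char cz r 1 0 (|x - cz|)]
    cases h' : fmi (r.map (fun d => |d - cz|)) with
    | none =>
      rw [fmi, h'] at hf
      obtain ⟨rfl, -⟩ : 0 = j ∧ |x - cz| = m := by
        refine ⟨?_, ?_⟩ <;> · injection hf with hf; injection hf with h1 h2
      simp [fdfiUpd]
    | some p =>
      obtain ⟨j', m'⟩ := p
      rw [fmi, h'] at hf
      by_cases hx : |x - cz| ≤ m'
      · simp only [hx, if_true, Option.some.injEq, Prod.mk.injEq] at hf
        obtain ⟨rfl, -⟩ := hf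
        have hlt : ¬ (m' < |x - cz|) := by omega
        simp [fdfiUpd, hlt]
      · simp only [hx, if_false, Option.some.injEq, Prod.mk.injEq] at hf
        obtain ⟨rfl, -⟩ := hf
        have hlt : m' < |x - cz| := by omega
        simp [fdfiUpd, hlt]
        omega
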